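-- pv_equiv track=rewrite | github.com/DreamOfTheRedChamber/leetcode | Python/Contest/MaxNumofFamilies.py | maxNumberOfFamilies
-- ===== SOURCE A (Python) =====
-- from collections import defaultdict
-- from typing import List
--
-- def maxNumberOfFamilies(n: int, reservedSeats: List[List[int]]) -> int:
--     leftSet = {2, 3, 4, 5}
--     middleSet = {4, 5, 6, 7}
--     rightSet = {6, 7, 8, 9}
--
--     sortedReserved = defaultdict(set)
--     for seat in reservedSeats:
--         sortedReserved[seat[0]].add(seat[1])
--
--     numOfFamilies = 0
--     for i in range(1, n + 1):
--         reserved = sortedReserved[i]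
--         left = leftSet & reserved
--         right = rightSet & reserved
--         middle = middleSet & reserved
--         leftSeatAva = len(leftSet & reserved) == 0
--         rightSeatAva = len(rightSet & reserved) == 0
--         middleSeatAva = len(middleSet & reserved) == 0
--
--         if leftSeatAva and rightSeatAva:
--             numOfFamilies += 2
--         else:
--             if leftSeatAva or rightSeatAva or middleSeatAva:
--                 numOfFamilies += 1
--
--     return numOfFamilies
-- ===== SOURCE B (Python) =====
-- def maxNumberOfFamilies(n, reservedSeats):
--     # Group reserved seats by row, keeping only rows that exist (1..n);
--     # every untouched row contributes 2 families, so start from 2*max(n,0)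
--     # and subtract the per-row loss for reserved rows only.
--     rows = {}
--     for seat in reservedSeats:
--         if 1 <= seat[0] <= n:
--             rows.setdefault(seat[0], set()).add(seat[1])
--     total = 2 * max(n, 0)
--     for res in rows.values():
--         left_free = not (res & {2, 3, 4, 5})
--         right_free = not (res & {6, 7, 8, 9})
--         if left_free and right_free:
--             continue
--         if left_free or right_free or not (res & {4, 5, 6, 7}):
--             total -= 1
--         else:
--             total -= 2
--     return total
-- ===== Notes on version B (the rewrite author's own statement) =====
-- stated objective: faster
-- what changed: B groups reserved seats by row and loops only over the reserved rows, starting from the closed-form 2*max(n,0) for all rows and subtracting each reserved row's loss, instead of A's scan over every row 1..n.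
import Mathlib
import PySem

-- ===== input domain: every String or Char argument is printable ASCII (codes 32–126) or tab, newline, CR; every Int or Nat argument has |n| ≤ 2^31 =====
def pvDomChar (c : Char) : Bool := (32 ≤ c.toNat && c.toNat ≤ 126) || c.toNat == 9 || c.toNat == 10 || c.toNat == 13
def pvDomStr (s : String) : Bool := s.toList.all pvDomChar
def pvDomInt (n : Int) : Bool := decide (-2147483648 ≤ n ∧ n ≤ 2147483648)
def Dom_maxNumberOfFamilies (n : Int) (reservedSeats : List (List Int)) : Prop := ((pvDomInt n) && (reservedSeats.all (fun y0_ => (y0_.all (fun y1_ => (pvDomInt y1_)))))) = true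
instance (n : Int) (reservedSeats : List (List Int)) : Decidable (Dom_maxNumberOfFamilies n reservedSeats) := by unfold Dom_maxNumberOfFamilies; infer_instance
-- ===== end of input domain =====

-- B iterates only the reserved rows (each untouched row contributes 2 families, taken in closed form),
-- replacing A's scan of all n rows: that is the whole change (objective: faster on large n).

-- ===== PORT A =====
-- Pre_ guarantees every inner list has ≥ 2 entries, so the pyGetD defaults below are never read
-- (Python raises IndexError exactly there, excluded by Pre_).  The defaultdict read
-- 'reserved = sortedReserved[i]' inserts an empty set for a missing key; that insertion never
-- changes any later getD value, so the dict is not re-threaded through the loop state.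
def maxNumberOfFamilies (n : Int) (reservedSeats : List (List Int)) : Int :=
  let leftSet : PySem.Set Int := PySem.Set.ofList [2, 3, 4, 5]
  let middleSet : PySem.Set Int := PySem.Set.ofList [4, 5, 6, 7]
  let rightSet : PySem.Set Int := PySem.Set.ofList [6, 7, 8, 9]
  let sortedReserved : PySem.Dict Int (PySem.Set Int) :=
    reservedSeats.foldl
      (fun d seat =>
        d.modify (PySem.List.pyGetD seat 0 0) PySem.Set.empty
          (fun s => PySem.Set.add s (PySem.List.pyGetD seat 1 0)))
      PySem.Dict.empty
  (PySem.List.pyRange 1 (n + 1) 1).foldl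
    (fun numOfFamilies i =>
      let reserved := sortedReserved.getD i PySem.Set.empty
      let _left := PySem.Set.inter leftSet reserved
      let _right := PySem.Set.inter rightSet reserved
      let _middle := PySem.Set.inter middleSet reserved
      let leftSeatAva := PySem.Set.len (PySem.Set.inter leftSet reserved) == 0
      let rightSeatAva := PySem.Set.len (PySem.Set.inter rightSet reserved) == 0
      let middleSeatAva := PySem.Set.len (PySem.Set.inter middleSet reserved) == 0
      if leftSeatAva && rightSeatAva then numOfFamilies + 2
      else if leftSeatAva || rightSeatAva || middleSeatAva then numOfFamilies + 1
      else numOfFamilies)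
    0

-- ===== PORT B =====
def maxNumberOfFamilies_alt (n : Int) (reservedSeats : List (List Int)) : Int :=
  let rows : PySem.Dict Int (PySem.Set Int) :=
    reservedSeats.foldl
      (fun d seat =>
        if 1 ≤ PySem.List.pyGetD seat 0 0 ∧ PySem.List.pyGetD seat 0 0 ≤ n then
          d.modify (PySem.List.pyGetD seat 0 0) PySem.Set.empty
            (fun s => PySem.Set.add s (PySem.List.pyGetD seat 1 0))
        else d)
      PySem.Dict.empty
  rows.values.foldl
    (fun total res =>
      let leftFree := (PySem.Set.inter res (PySem.Set.ofList [2, 3, 4, 5])).isEmpty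
      let rightFree := (PySem.Set.inter res (PySem.Set.ofList [6, 7, 8, 9])).isEmpty
      if leftFree && rightFree then total
      else if leftFree || rightFree || (PySem.Set.inter res (PySem.Set.ofList [4, 5, 6, 7])).isEmpty then total - 1
      else total - 2)
    (2 * max n 0)

-- ===== PRECONDITION & SPEC =====
-- Pre_ excludes only the inputs where Python A raises IndexError: some seat entry with fewer than two elements.
def Pre_maxNumberOfFamilies (n : Int) (reservedSeats : List (List Int)) : Prop :=
  ∀ seat ∈ reservedSeats, 2 ≤ seat.length
instance (n : Int) (reservedSeats : List (List Int)) : Decidable (Pre_maxNumberOfFamilies n reservedSeats) := by unfold Pre_maxNumberOfFamilies; infer_instance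
def pvWitness_maxNumberOfFamilies : Int × List (List Int) := (3, [[1, 2], [1, 3], [2, 7]])

def Spec_maxNumberOfFamilies (n : Int) (reservedSeats : List (List Int)) (out : Int) : Prop := out = maxNumberOfFamilies_alt n reservedSeats
instance (n : Int) (reservedSeats : List (List Int)) (out : Int) : Decidable (Spec_maxNumberOfFamilies n reservedSeats out) := by unfold Spec_maxNumberOfFamilies; infer_instance

-- ===== CLAIM (what is proved, stated in full; the proofs are below) =====
def Claim_equal_maxNumberOfFamilies : Prop := ∀ (n : Int) (reservedSeats : List (List Int)), Dom_maxNumberOfFamilies n reservedSeats → Pre_maxNumberOfFamilies n reservedSeats → Spec_maxNumberOfFamilies n reservedSeats (maxNumberOfFamilies n reservedSeats)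

-- ===== LEMMAS AND PROOFS =====

-- A's per-row contribution, as a function of the row's reserved set
def pvFA (reserved : PySem.Set Int) : Int :=
  let leftSeatAva := PySem.Set.len (PySem.Set.inter (PySem.Set.ofList [2, 3, 4, 5]) reserved) == 0
  let rightSeatAva := PySem.Set.len (PySem.Set.inter (PySem.Set.ofList [6, 7, 8, 9]) reserved) == 0
  let middleSeatAva := PySem.Set.len (PySem.Set.inter (PySem.Set.ofList [4, 5, 6, 7]) reserved) == 0
  if leftSeatAva && rightSeatAva then 2
  else if leftSeatAva || rightSeatAva || middleSeatAva then 1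
  else 0

-- B's per-row contribution
def pvFB (res : PySem.Set Int) : Int :=
  let leftFree := (PySem.Set.inter res (PySem.Set.ofList [2, 3, 4, 5])).isEmpty
  let rightFree := (PySem.Set.inter res (PySem.Set.ofList [6, 7, 8, 9])).isEmpty
  if leftFree && rightFree then 2
  else if leftFree || rightFree || (PySem.Set.inter res (PySem.Set.ofList [4, 5, 6, 7])).isEmpty then 1
  else 0

-- A's grouping dict
def pvDA (reservedSeats : List (List Int)) : PySem.Dict Int (PySem.Set Int) :=
  reservedSeats.foldl
    (fun d seat =>
      d.modify (PySem.List.pyGetD seat 0 0) PySem.Set.empty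
        (fun s => PySem.Set.add s (PySem.List.pyGetD seat 1 0)))
    PySem.Dict.empty

-- B's grouping dict
def pvDB (n : Int) (reservedSeats : List (List Int)) : PySem.Dict Int (PySem.Set Int) :=
  reservedSeats.foldl
    (fun d seat =>
      if 1 ≤ PySem.List.pyGetD seat 0 0 ∧ PySem.List.pyGetD seat 0 0 ≤ n then
        d.modify (PySem.List.pyGetD seat 0 0) PySem.Set.empty
          (fun s => PySem.Set.add s (PySem.List.pyGetD seat 1 0))
      else d)
    PySem.Dict.empty

lemma pv_inter_empty_comm (a b : List Int) :
    (PySem.Set.len (PySem.Set.inter a b) == 0) = (PySem.Set.inter b a).isEmpty := by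
  simp only [PySem.Set.len, PySem.Set.inter, PySem.Set.contains]
  rw [Bool.eq_iff_iff]
  simp only [beq_iff_eq, Nat.cast_eq_zero, List.length_eq_zero_iff, List.isEmpty_iff,
    List.filter_eq_nil_iff, List.contains_eq_mem, Bool.not_eq_true, decide_eq_false_iff_not]
  constructor
  · intro h x hx hmem; exact h x hmem hx
  · intro h x hx hmem; exact h x hmem hx

lemma pvFA_eq_pvFB (s : PySem.Set Int) : pvFA s = pvFB s := by
  simp only [pvFA, pvFB, pv_inter_empty_comm]

lemma pv_dicts_agree_aux (n : Int) (rs : List (List Int)) :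
    ∀ (d1 d2 : PySem.Dict Int (PySem.Set Int)),
      (∀ i, 1 ≤ i → i ≤ n → d1.getD i PySem.Set.empty = d2.getD i PySem.Set.empty) →
      ∀ i, 1 ≤ i → i ≤ n →
        (rs.foldl (fun d seat =>
            d.modify (PySem.List.pyGetD seat 0 0) PySem.Set.empty
              (fun s => PySem.Set.add s (PySem.List.pyGetD seat 1 0))) d1).getD i PySem.Set.empty
        = (rs.foldl (fun d seat =>
            if 1 ≤ PySem.List.pyGetD seat 0 0 ∧ PySem.List.pyGetD seat 0 0 ≤ n then
              d.modify (PySem.List.pyGetD seat 0 0) PySem.Set.empty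
                (fun s => PySem.Set.add s (PySem.List.pyGetD seat 1 0))
            else d) d2).getD i PySem.Set.empty := by
  induction rs with
  | nil => intro d1 d2 h i h1 h2; exact h i h1 h2
  | cons seat rest ih =>
    intro d1 d2 h i h1 h2
    simp only [List.foldl_cons]
    refine ih _ _ ?_ i h1 h2
    intro j hj1 hj2
    by_cases hg : 1 ≤ PySem.List.pyGetD seat 0 0 ∧ PySem.List.pyGetD seat 0 0 ≤ n
    · simp only [if_pos hg, PySem.Dict.getD_modify]
      split_ifs with hk
      · rw [h _ hg.1 hg.2]
      · exact h j hj1 hj2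
    · simp only [if_neg hg, PySem.Dict.getD_modify]
      have : j ≠ PySem.List.pyGetD seat 0 0 := by
        intro hEq; exact hg (by rw [← hEq]; exact ⟨hj1, hj2⟩)
      rw [if_neg this]
      exact h j hj1 hj2

lemma pv_dicts_agree (n : Int) (rs : List (List Int)) :
    ∀ i, 1 ≤ i → i ≤ n → (pvDA rs).getD i PySem.Set.empty = (pvDB n rs).getD i PySem.Set.empty := by
  exact pv_dicts_agree_aux n rs PySem.Dict.empty PySem.Dict.empty (fun _ _ _ => rfl)

lemma pvDB_keys_aux (n : Int) (rs : List (List Int)) :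
    ∀ (d : PySem.Dict Int (PySem.Set Int)),
      d.keys.Nodup → (∀ k ∈ d.keys, 1 ≤ k ∧ k ≤ n) →
      ((rs.foldl (fun d seat =>
          if 1 ≤ PySem.List.pyGetD seat 0 0 ∧ PySem.List.pyGetD seat 0 0 ≤ n then
            d.modify (PySem.List.pyGetD seat 0 0) PySem.Set.empty
              (fun s => PySem.Set.add s (PySem.List.pyGetD seat 1 0))
          else d) d).keys.Nodup
       ∧ ∀ k ∈ (rs.foldl (fun d seat =>
          if 1 ≤ PySem.List.pyGetD seat 0 0 ∧ PySem.List.pyGetD seat 0 0 ≤ n then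
            d.modify (PySem.List.pyGetD seat 0 0) PySem.Set.empty
              (fun s => PySem.Set.add s (PySem.List.pyGetD seat 1 0))
          else d) d).keys, 1 ≤ k ∧ k ≤ n) := by
  induction rs with
  | nil => intro d hnd hrange; exact ⟨hnd, hrange⟩
  | cons seat rest ih =>
    intro d hnd hrange
    simp only [List.foldl_cons]
    by_cases hg : 1 ≤ PySem.List.pyGetD seat 0 0 ∧ PySem.List.pyGetD seat 0 0 ≤ n
    · rw [if_pos hg]
      apply ih
      · rw [PySem.Dict.keys_modify]
        exact PySem.Dict.nodup_keys_insert _ _ _ hnd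
      · intro k hk
        rw [PySem.Dict.keys_modify] at hk
        have := (PySem.Dict.mem_keys_insert _ _ _ _).mp hk
        rcases this with h | h
        · rw [h]; exact hg
        · exact hrange k h
    · rw [if_neg hg]; exact ih d hnd hrange

lemma pv_sum_map_update (R : List Int) (hR : R.Nodup) (k : Int) (hk : k ∈ R)
    (F G : Int → Int) (h : ∀ i ∈ R, i ≠ k → F i = G i) :
    (R.map F).sum = (R.map G).sum + (F k - G k) := by
  induction R with
  | nil => cases hk
  | cons a R' ih =>
    rcases List.nodup_cons.mp hR with ⟨hna, hR'⟩
    rcases List.mem_cons.mp hk with h1 | h1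
    · subst h1
      have : R'.map F = R'.map G := by
        apply List.map_congr_left
        intro i hi
        exact h i (List.mem_cons_of_mem _ hi) (fun hik => hna (hik ▸ hi))
      simp only [List.map_cons, List.sum_cons, this]
      ring
    · have hak : a ≠ k := fun hEq => hna (hEq ▸ h1)
      have hFa : F a = G a := h a (List.mem_cons_self) hak
      simp only [List.map_cons, List.sum_cons, hFa,
        ih hR' h1 (fun i hi hik => h i (List.mem_cons_of_mem _ hi) hik)]
      ring

lemma pv_regroup (R : List Int) (hR : R.Nodup) (L : List (Int × PySem.Set Int))
    (hnd : (L.map Prod.fst).Nodup) (hsub : ∀ p ∈ L, p.1 ∈ R)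
    (g : PySem.Set Int → Int) (hg : g PySem.Set.empty = 2) :
    (R.map (fun i => g ((PySem.Dict.mk L).getD i PySem.Set.empty))).sum
      = 2 * R.length + (L.map (fun p => g p.2 - 2)).sum := by
  induction L with
  | nil =>
    simp only [List.map_nil, List.sum_nil, add_zero]
    have : (R.map (fun i => g ((PySem.Dict.mk ([] : List (Int × PySem.Set Int))).getD i PySem.Set.empty)))
        = R.map (fun _ => (2 : Int)) := by
      apply List.map_congr_left
      intro i _
      show g (PySem.Dict.empty.getD i PySem.Set.empty) = 2
      rw [PySem.Dict.getD_empty, hg]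
    rw [this, PySem.List.sum_map_const_int]
    ring
  | cons p L' ih =>
    obtain ⟨k, v⟩ := p
    rcases List.nodup_cons.mp hnd with ⟨hkL', hndL'⟩
    have hkR : k ∈ R := hsub (k, v) List.mem_cons_self
    have hstep : ∀ i ∈ R, i ≠ k →
        g ((PySem.Dict.mk ((k, v) :: L')).getD i PySem.Set.empty)
          = g ((PySem.Dict.mk L').getD i PySem.Set.empty) := by
      intro i _ hik
      rw [PySem.Dict.getD_eq_get?_getD, PySem.Dict.get?_mk_cons,
        if_neg (by simp [beq_iff_eq]; exact fun h => hik h.symm), ← PySem.Dict.getD_eq_get?_getD]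
    have hFk : g ((PySem.Dict.mk ((k, v) :: L')).getD k PySem.Set.empty) = g v := by
      rw [PySem.Dict.getD_eq_get?_getD, PySem.Dict.get?_mk_cons, if_pos (by simp)]
      rfl
    have hGk : g ((PySem.Dict.mk L').getD k PySem.Set.empty) = 2 := by
      have hget : (PySem.Dict.mk L').get? k = none := by
        rw [PySem.Dict.get?_eq_none_iff_not_mem_keys, PySem.Dict.keys_mk]
        exact hkL'
      rw [PySem.Dict.getD_eq_get?_getD, hget]
      exact hg
    rw [pv_sum_map_update R hR k hkR _ _ hstep,
      ih hndL' (fun q hq => hsub q (List.mem_cons_of_mem _ hq)), hFk, hGk]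
    simp only [List.map_cons, List.sum_cons]
    ring

lemma pv_A_sum (n : Int) (rs : List (List Int)) :
    maxNumberOfFamilies n rs
      = ((PySem.List.pyRange 1 (n + 1) 1).map
          (fun i => pvFA ((pvDA rs).getD i PySem.Set.empty))).sum := by
  have hbody : maxNumberOfFamilies n rs
      = (PySem.List.pyRange 1 (n + 1) 1).foldl
          (fun acc i => acc + pvFA ((pvDA rs).getD i PySem.Set.empty)) 0 := by
    simp only [maxNumberOfFamilies, pvDA, pvFA]
    congr 1
    funext acc i
    split_ifs <;> ring
  rw [hbody, PySem.List.foldl_add]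
  ring

lemma pv_B_sum (n : Int) (rs : List (List Int)) :
    maxNumberOfFamilies_alt n rs
      = 2 * max n 0 + ((pvDB n rs).values.map (fun v => pvFB v - 2)).sum := by
  have hbody : maxNumberOfFamilies_alt n rs
      = (pvDB n rs).values.foldl (fun total res => total + (pvFB res - 2)) (2 * max n 0) := by
    simp only [maxNumberOfFamilies_alt, pvDB, pvFB]
    congr 1
    funext total res
    split_ifs <;> ring
  rw [hbody, PySem.List.foldl_add]

-- ===== VERDICT (by name: the statement is the Claim_ definition above) =====
theorem maxNumberOfFamilies_spec : Claim_equal_maxNumberOfFamilies := by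
  intro n rs _ _
  unfold Spec_maxNumberOfFamilies
  rw [pv_A_sum, pv_B_sum]
  have hkeys := pvDB_keys_aux n rs PySem.Dict.empty (by simp [PySem.Dict.empty, PySem.Dict.keys]) (by simp [PySem.Dict.empty, PySem.Dict.keys])
  have hnd : (pvDB n rs).keys.Nodup := hkeys.1
  have hrange : ∀ k ∈ (pvDB n rs).keys, 1 ≤ k ∧ k ≤ n := hkeys.2
  have hmapeq : ((PySem.List.pyRange 1 (n + 1) 1).map
      (fun i => pvFA ((pvDA rs).getD i PySem.Set.empty))).sum
      = ((PySem.List.pyRange 1 (n + 1) 1).map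
      (fun i => pvFB ((pvDB n rs).getD i PySem.Set.empty))).sum := by
    congr 1
    apply List.map_congr_left
    intro i hi
    rcases PySem.List.mem_pyRange_one.mp hi with ⟨h1, h2⟩
    rw [pv_dicts_agree n rs i h1 (by omega), pvFA_eq_pvFB]
  rw [hmapeq]
  have hmk : PySem.Dict.mk (pvDB n rs).items = pvDB n rs := rfl
  have hreg := pv_regroup (PySem.List.pyRange 1 (n + 1) 1)
    (PySem.List.nodup_pyRange_one 1 (n + 1)) (pvDB n rs).items
    (by rw [show (pvDB n rs).items.map Prod.fst = (pvDB n rs).keys from rfl]; exact hnd)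
    (fun p hp => by
      rcases hrange p.1 (by rw [show (pvDB n rs).keys = (pvDB n rs).items.map Prod.fst from rfl]; exact List.mem_map_of_mem hp) with ⟨ha, hb⟩
      exact PySem.List.mem_pyRange_one.mpr ⟨ha, by omega⟩)
    pvFB (by decide)
  rw [hmk] at hreg
  rw [hreg, PySem.List.length_pyRange_one]
  have hvals : (pvDB n rs).values.map (fun v => pvFB v - 2)
      = (pvDB n rs).items.map (fun p => pvFB p.2 - 2) := by
    rw [show (pvDB n rs).values = (pvDB n rs).items.map Prod.snd from rfl, List.map_map]
    rfl
  rw [hvals]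
  have : ((n + 1 - 1).toNat : Int) = max n 0 := by
    rw [Int.toNat_eq_max]; omega
  rw [this]
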